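-- pv_equiv track=rewrite | github.com/ngeodesic-ai/ngf-alpha | dev/small-benchmarks-depr-v1/stage11-well-benchmark-v10e.py | _expected_after_seed
-- ===== SOURCE A (Python) =====
-- def _expected_after_seed(rows: int, cols: int):
--     """
--     We already seeded '[[' into the model context AND into out_chars.
--     This returns the remaining symbol sequence over { 'd', ',', '[', ']' } to
--     produce exactly an r×c grid: [[ <row0> , <row1> , ... ]]
--     """
--     seq = []
--     for r in range(rows):
--         # row r: digits with commas between cells
--         for c in range(cols):
--             seq.append('d')
--             if c < cols - 1:
--                 seq.append(',')
--         # close this row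
--         seq.append(']')
--         # open next row if needed: ",["
--         if r < rows - 1:
--             seq += [',', '[']
--     # close outer list
--     seq.append(']')
--     return seq
-- ===== SOURCE B (Python) =====
-- def _expected_after_seed(rows: int, cols: int):
--     if rows <= 0:
--         return [']']
--     return list('],['.join(','.join('d' * cols) for _ in range(rows)) + ']]')
-- ===== Notes on version B (the rewrite author's own statement) =====
-- stated objective: idiomatic
-- what changed: Replaces the nested append loops with their positional if-branches by a join-based construction: each row is ','.join('d'*cols), rows are joined with '],[' and closed with ']]', then split into characters with list(); only the empty-grid case (rows<=0, where range is empty) keeps a one-line guard.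
import Mathlib
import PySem

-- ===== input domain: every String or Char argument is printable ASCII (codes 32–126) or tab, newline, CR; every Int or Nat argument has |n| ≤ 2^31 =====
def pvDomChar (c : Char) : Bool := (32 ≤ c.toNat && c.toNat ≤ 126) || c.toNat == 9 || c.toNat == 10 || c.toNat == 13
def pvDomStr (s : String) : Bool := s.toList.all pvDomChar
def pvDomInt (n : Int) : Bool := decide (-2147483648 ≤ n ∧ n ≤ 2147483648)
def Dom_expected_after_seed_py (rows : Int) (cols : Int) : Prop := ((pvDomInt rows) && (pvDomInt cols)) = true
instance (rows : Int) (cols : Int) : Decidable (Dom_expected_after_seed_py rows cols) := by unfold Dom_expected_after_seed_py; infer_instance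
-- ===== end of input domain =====

-- B builds the grid tail as one joined string and splits it into characters (idiomatic join vs nested appends); same cost.

-- ===== PORT A =====
def expected_after_seed_py (rows : Int) (cols : Int) : List String :=
  let seq : List String := []
  let seq := (PySem.List.pyRange 0 rows 1).foldl (fun seq r =>
      let seq := (PySem.List.pyRange 0 cols 1).foldl (fun seq c =>
          let seq := seq ++ ["d"]
          if c < cols - 1 then seq ++ [","] else seq) seq
      let seq := seq ++ ["]"]
      if r < rows - 1 then seq ++ [",", "["] else seq) seq
  seq ++ ["]"]

-- ===== PORT B =====
-- 'd'*cols and the two str.joins are kept on List Char (PySem.Chars.join); list(s) is the final map to one-char strings.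
def expected_after_seed_py_alt (rows : Int) (cols : Int) : List String :=
  if rows ≤ 0 then ["]"]
  else
    let row : List Char := PySem.Chars.join [','] (List.replicate cols.toNat ['d'])
    let s : List Char :=
      PySem.Chars.join [']', ',', '['] (List.replicate rows.toNat row) ++ [']', ']']
    s.map (fun c => String.mk [c])

-- ===== PRECONDITION & SPEC =====
def Spec_expected_after_seed_py (rows : Int) (cols : Int) (out : List String) : Prop := out = expected_after_seed_py_alt rows cols
instance (rows : Int) (cols : Int) (out : List String) : Decidable (Spec_expected_after_seed_py rows cols out) := by unfold Spec_expected_after_seed_py; infer_instance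

-- ===== CLAIM (what is proved, stated in full; the proofs are below) =====
def Claim_equal_expected_after_seed_py : Prop := ∀ (rows : Int) (cols : Int), Dom_expected_after_seed_py rows cols → Spec_expected_after_seed_py rows cols (expected_after_seed_py rows cols)

-- ===== LEMMAS AND PROOFS =====

theorem pv_flatMap_const {α β : Type} (l : List α) (b : List β) :
    l.flatMap (fun _ => b) = (List.replicate l.length b).flatten := by
  induction l with
  | nil => simp
  | cons x xs ih => simp [List.flatMap_cons, ih, List.replicate_succ]

-- flatMap of a cutoff-conditional over range(0, m): all but the last element take the first branch
theorem pv_flatMap_cut {β : Type} (m : Int) (hm : 1 ≤ m) (X Y : List β) :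
    (PySem.List.pyRange 0 m 1).flatMap (fun c => if c < m - 1 then X else Y)
      = (List.replicate (m - 1).toNat X).flatten ++ Y := by
  have hsplit := PySem.List.pyRange_one_append 0 (m - 1) m (by omega) (by omega)
  have hlast : PySem.List.pyRange (m - 1) m 1 = [m - 1] := by
    have := PySem.List.pyRange_one_singleton (m - 1)
    simpa [show m - 1 + 1 = m by omega] using this
  rw [hsplit, hlast, List.flatMap_append]
  have hcongr : (PySem.List.pyRange 0 (m - 1) 1).flatMap (fun c => if c < m - 1 then X else Y)
      = (PySem.List.pyRange 0 (m - 1) 1).flatMap (fun _ => X) := by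
    apply List.flatMap_congr
    intro c hc
    have := (PySem.List.mem_pyRange_one.mp hc).2
    simp [this]
  rw [hcongr, pv_flatMap_const, PySem.List.length_pyRange_one]
  simp [List.flatMap_cons]

theorem pv_joinRep (sep row : List Char) (k : Nat) :
    PySem.Chars.join sep (List.replicate (k + 1) row)
      = (List.replicate k (row ++ sep)).flatten ++ row := by
  induction k with
  | zero => simp [PySem.Chars.join_singleton]
  | succ n ih =>
    have : List.replicate (n + 1 + 1) row = row :: row :: List.replicate n row := by
      simp [List.replicate_succ]
    rw [this]
    have h2 : List.replicate (n + 1) row = row :: List.replicate n row := by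
      simp [List.replicate_succ]
    rw [PySem.Chars.join_cons_cons, ← h2, ih]
    simp [List.replicate_succ]

-- the inner loop of A, as a flatMap
theorem pv_inner_fold (cols : Int) (acc : List String) :
    (PySem.List.pyRange 0 cols 1).foldl (fun seq c =>
        let seq := seq ++ ["d"]
        if c < cols - 1 then seq ++ [","] else seq) acc
      = acc ++ (PySem.List.pyRange 0 cols 1).flatMap
          (fun c => if c < cols - 1 then ["d", ","] else ["d"]) := by
  have hfe : (fun (seq : List String) c =>
        let seq := seq ++ ["d"]
        if c < cols - 1 then seq ++ [","] else seq)
      = fun seq c => seq ++ (if c < cols - 1 then ["d", ","] else ["d"]) := by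
    funext s c
    by_cases h : c < cols - 1 <;> simp [h]
  rw [hfe, PySem.List.foldl_append_eq_flatMap]

-- A's row content equals B's row string, character-wise
theorem pv_row_eq (cols : Int) :
    (PySem.List.pyRange 0 cols 1).flatMap (fun c => if c < cols - 1 then ["d", ","] else ["d"])
      = (PySem.Chars.join [','] (List.replicate cols.toNat ['d'])).map (fun c => String.mk [c]) := by
  by_cases hc : cols ≤ 0
  · rw [PySem.List.pyRange_one_eq_nil (by omega)]
    have : cols.toNat = 0 := by omega
    simp [this, PySem.Chars.join, List.intercalate]
  · have h1 : (1 : Int) ≤ cols := by omega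
    have hk : cols.toNat = (cols - 1).toNat + 1 := by omega
    rw [pv_flatMap_cut cols h1, hk, pv_joinRep]
    simp [show String.mk ['d'] = "d" from rfl, show String.mk [','] = "," from rfl]

theorem expected_after_seed_eq (rows cols : Int) :
    expected_after_seed_py rows cols = expected_after_seed_py_alt rows cols := by
  by_cases hr : rows ≤ 0
  · simp [expected_after_seed_py, expected_after_seed_py_alt, hr,
      PySem.List.pyRange_one_eq_nil hr]
  · have h1 : (1 : Int) ≤ rows := by omega
    have hk : rows.toNat = (rows - 1).toNat + 1 := by omega
    unfold expected_after_seed_py expected_after_seed_py_alt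
    rw [if_neg hr]
    have hfe : (fun (seq : List String) r =>
          let seq := (PySem.List.pyRange 0 cols 1).foldl (fun seq c =>
              let seq := seq ++ ["d"]
              if c < cols - 1 then seq ++ [","] else seq) seq
          let seq := seq ++ ["]"]
          if r < rows - 1 then seq ++ [",", "["] else seq)
        = fun seq r => seq ++ (if r < rows - 1
            then ((PySem.List.pyRange 0 cols 1).flatMap
                    (fun c => if c < cols - 1 then ["d", ","] else ["d"])) ++ ["]", ",", "["]
            else ((PySem.List.pyRange 0 cols 1).flatMap
                    (fun c => if c < cols - 1 then ["d", ","] else ["d"])) ++ ["]"]) := by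
      funext s r
      rw [pv_inner_fold]
      by_cases h : r < rows - 1 <;> simp [h]
    simp only [hfe, PySem.List.foldl_append_eq_flatMap]
    rw [pv_flatMap_cut rows h1 _ _, hk, pv_joinRep]
    rw [pv_row_eq cols]
    simp [show String.mk [']'] = "]" from rfl, show String.mk [','] = "," from rfl,
      show String.mk ['['] = "[" from rfl]

-- ===== VERDICT (by name: the statement is the Claim_ definition above) =====
theorem expected_after_seed_py_spec : Claim_equal_expected_after_seed_py := by
  intro rows cols _
  unfold Spec_expected_after_seed_py
  exact expected_after_seed_eq rows cols
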